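-- pv_equiv track=rewrite | github.com/matthewskahn/aoc_2024 | day15/part2.py | expand_board
-- ===== SOURCE A (Python) =====
-- def expand_board(board):
--     expanded_board = []
--     for line in board:
--         new_line = line.replace('.', '..')
--         new_line = new_line.replace('O', '[]')
--         new_line = new_line.replace('#', '##')
--         new_line = new_line.replace('@', '@.')
--         expanded_board.append(list(new_line))
--     return expanded_board
-- ===== SOURCE B (Python) =====
-- def expand_board(board):
--     mapping = {'.': '..', 'O': '[]', '#': '##', '@': '@.'}
--     return [[ch for c in line for ch in mapping.get(c, c)] for line in board]
-- ===== Notes on version B (the rewrite author's own statement) =====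
-- stated objective: idiomatic
-- what changed: Replaces the four sequential full-string str.replace scans by one character-by-character pass that looks each tile up in a precomputed expansion dict.
import Mathlib
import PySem

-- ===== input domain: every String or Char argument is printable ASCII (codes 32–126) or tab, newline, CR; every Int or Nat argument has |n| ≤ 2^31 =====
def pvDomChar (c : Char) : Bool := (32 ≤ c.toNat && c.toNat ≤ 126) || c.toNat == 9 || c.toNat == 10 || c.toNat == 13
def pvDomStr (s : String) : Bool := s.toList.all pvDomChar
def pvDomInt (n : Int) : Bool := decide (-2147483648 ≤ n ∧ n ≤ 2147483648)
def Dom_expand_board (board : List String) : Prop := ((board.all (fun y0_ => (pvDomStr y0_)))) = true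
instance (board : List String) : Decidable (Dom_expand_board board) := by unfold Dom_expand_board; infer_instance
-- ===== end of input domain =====

-- B replaces A's four sequential full-string str.replace passes by one per-character
-- pass over a precomputed expansion dict (idiomatic; same result).

-- ===== PORT A =====
def expand_board (board : List String) : List (List String) :=
  board.foldl (fun expanded_board line =>
    let new_line := PySem.Str.replace line "." ".."
    let new_line := PySem.Str.replace new_line "O" "[]"
    let new_line := PySem.Str.replace new_line "#" "##"
    let new_line := PySem.Str.replace new_line "@" "@."
    expanded_board ++ [new_line.toList.map (fun c => String.ofList [c])]) []

-- ===== PORT B =====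
def pvMapping : PySem.Dict Char String :=
  PySem.Dict.ofList [('.', ".."), ('O', "[]"), ('#', "##"), ('@', "@.")]

def expand_board_alt (board : List String) : List (List String) :=
  board.map (fun line =>
    (line.toList.flatMap (fun c => (PySem.Dict.getD pvMapping c (String.ofList [c])).toList)).map
      (fun ch => String.ofList [ch]))

-- ===== PRECONDITION & SPEC =====
def Spec_expand_board (board : List String) (out : List (List String)) : Prop := out = expand_board_alt board
instance (board : List String) (out : List (List String)) : Decidable (Spec_expand_board board out) := by unfold Spec_expand_board; infer_instance

-- ===== CLAIM (what is proved, stated in full; the proofs are below) =====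
def Claim_equal_expand_board : Prop := ∀ (board : List String), Dom_expand_board board → Spec_expand_board board (expand_board board)

-- ===== LEMMAS AND PROOFS =====

/-- str.replace with a single-character pattern is a per-character flatMap. -/
def repl1 (o : Char) (new : List Char) (l : List Char) : List Char :=
  l.flatMap (fun c => if c = o then new else [c])

theorem go_single (o : Char) (new : List Char) :
    ∀ (l : List Char) (fuel : Nat) (acc : List Char), l.length ≤ fuel →
      PySem.Chars.replace.go [o] new fuel l acc = acc.reverse ++ repl1 o new l := by
  intro l
  induction l with
  | nil =>
      intro fuel acc h
      cases fuel <;> simp [PySem.Chars.replace.go, repl1]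
  | cons c t ih =>
      intro fuel acc h
      cases fuel with
      | zero => simp at h
      | succ f =>
          by_cases hc : c = o
          · subst hc
            have hpre : [c].isPrefixOf (c :: t) = true := by
              simp [List.isPrefixOf]
            rw [PySem.Chars.replace.go, if_pos hpre]
            simp only [List.length_cons, List.length_nil, List.drop_succ_cons, List.drop_zero,
              Nat.zero_add] at h ⊢
            rw [ih f (new.reverse ++ acc) (by omega)]
            simp [repl1]
          · have hpre : [o].isPrefixOf (c :: t) = false := by
              simp [List.isPrefixOf]
              exact fun h' => hc h'.symm
            rw [PySem.Chars.replace.go, if_neg (by simp [hpre])]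
            simp only [List.length_cons] at h
            rw [ih f (c :: acc) (by omega)]
            simp [repl1, hc]

theorem replace_single (o : Char) (new l : List Char) :
    PySem.Chars.replace l [o] new = repl1 o new l := by
  rw [PySem.Chars.replace]
  simp only [List.isEmpty_cons, if_false, Bool.false_eq_true]
  simpa using go_single o new l l.length [] le_rfl

/-- the composed four replaces, char level -/
def chain4 (l : List Char) : List Char :=
  repl1 '@' ['@', '.'] (repl1 '#' ['#', '#'] (repl1 'O' ['[', ']'] (repl1 '.' ['.', '.'] l)))

theorem repl1_append (o : Char) (n a b : List Char) :
    repl1 o n (a ++ b) = repl1 o n a ++ repl1 o n b := by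
  simp [repl1]

theorem chain4_cons (c : Char) (t : List Char) :
    chain4 (c :: t) = chain4 [c] ++ chain4 t := by
  have : c :: t = [c] ++ t := rfl
  rw [this]
  simp only [chain4, repl1_append]

/-- what B appends per char -/
def mapB (c : Char) : List Char :=
  (PySem.Dict.getD pvMapping c (String.ofList [c])).toList

theorem chain4_singleton (c : Char) : chain4 [c] = mapB c := by
  by_cases h1 : c = '.'
  · subst h1; decide
  by_cases h2 : c = 'O'
  · subst h2; decide
  by_cases h3 : c = '#'
  · subst h3; decide
  by_cases h4 : c = '@'
  · subst h4; decide
  · have hm : pvMapping = PySem.Dict.mk [('.', ".."), ('O', "[]"), ('#', "##"), ('@', "@.")] := by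
      decide
    have e1 : ('.' == c) = false := by simpa using Ne.symm h1
    have e2 : ('O' == c) = false := by simpa using Ne.symm h2
    have e3 : ('#' == c) = false := by simpa using Ne.symm h3
    have e4 : ('@' == c) = false := by simpa using Ne.symm h4
    simp [chain4, repl1, mapB, hm, PySem.Dict.getD, PySem.Dict.get?, List.find?, h1, h2, h3, h4,
      e1, e2, e3, e4]

theorem chain4_eq_flatMap (l : List Char) : chain4 l = l.flatMap mapB := by
  induction l with
  | nil => decide
  | cons c t ih => rw [chain4_cons, chain4_singleton, ih]; rfl

theorem line_eq (l : List Char) :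
    PySem.Chars.replace (PySem.Chars.replace (PySem.Chars.replace
        (PySem.Chars.replace l ['.'] ['.', '.']) ['O'] ['[', ']']) ['#'] ['#', '#']) ['@'] ['@', '.']
      = l.flatMap mapB := by
  rw [replace_single, replace_single, replace_single, replace_single]
  exact chain4_eq_flatMap l

theorem expand_foldl (board : List String) (acc : List (List String)) :
    board.foldl (fun expanded_board line =>
      let new_line := PySem.Str.replace line "." ".."
      let new_line := PySem.Str.replace new_line "O" "[]"
      let new_line := PySem.Str.replace new_line "#" "##"
      let new_line := PySem.Str.replace new_line "@" "@."
      expanded_board ++ [new_line.toList.map (fun c => String.ofList [c])]) acc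
    = acc ++ expand_board_alt board := by
  induction board generalizing acc with
  | nil => simp [expand_board_alt]
  | cons line rest ih =>
      simp only [List.foldl_cons, expand_board_alt, List.map_cons]
      rw [ih]
      simp only [expand_board_alt, PySem.Str.replace, String.toList_ofList]
      rw [show ("." : String).toList = ['.'] from rfl,
          show ("O" : String).toList = ['O'] from rfl,
          show ("#" : String).toList = ['#'] from rfl,
          show ("@" : String).toList = ['@'] from rfl,
          show (".." : String).toList = ['.', '.'] from rfl,
          show ("[]" : String).toList = ['[', ']'] from rfl,
          show ("##" : String).toList = ['#', '#'] from rfl,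
          show ("@." : String).toList = ['@', '.'] from rfl,
          line_eq]
      simp only [List.append_assoc, List.cons_append, List.nil_append]
      rfl

-- ===== VERDICT (by name: the statement is the Claim_ definition above) =====
theorem expand_board_spec : Claim_equal_expand_board := by
  intro board _
  unfold Spec_expand_board expand_board
  simpa using expand_foldl board []
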